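-- pv_equiv track=rewrite | github.com/bmuralid/Pure-Fortran | fortran_scan.py | _tokenize_const_logical_expr
-- ===== SOURCE A (Python) =====
-- from typing import Dict, Iterable, List, Optional, Set, Tuple
--
-- def _tokenize_const_logical_expr(expr: str) -> Optional[List[str]]:
--     """Tokenize a logical expression containing only literal logical tokens."""
--     s = expr.strip().lower()
--     tokens: List[str] = []
--     i = 0
--     while i < len(s):
--         ch = s[i]
--         if ch.isspace():
--             i += 1
--             continue
--         if ch in "()":
--             tokens.append(ch)
--             i += 1
--             continue
--         if s.startswith(".true.", i):
--             tokens.append(".true.")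
--             i += 6
--             continue
--         if s.startswith(".false.", i):
--             tokens.append(".false.")
--             i += 7
--             continue
--         if s.startswith(".not.", i):
--             tokens.append(".not.")
--             i += 5
--             continue
--         if s.startswith(".and.", i):
--             tokens.append(".and.")
--             i += 5
--             continue
--         if s.startswith(".or.", i):
--             tokens.append(".or.")
--             i += 4
--             continue
--         if s.startswith(".eqv.", i):
--             tokens.append(".eqv.")
--             i += 5
--             continue
--         if s.startswith(".neqv.", i):
--             tokens.append(".neqv.")
--             i += 6
--             continue
--         return None
--     return tokens
-- ===== SOURCE B (Python) =====
-- from typing import List, Optional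
--
-- _LOGICAL_TOKENS = (".true.", ".false.", ".not.", ".and.", ".or.", ".eqv.", ".neqv.")
--
--
-- def _tokenize_const_logical_expr(expr: str) -> Optional[List[str]]:
--     """Tokenize a logical expression containing only literal logical tokens.
--
--     Instead of trying each literal as a prefix at every position, scan to the
--     closing dot of the current word once and do a single membership test.
--     """
--     s = expr.strip().lower()
--     tokens: List[str] = []
--     pos = 0
--     n = len(s)
--     while pos < n:
--         ch = s[pos]
--         if ch.isspace():
--             pos += 1
--         elif ch in "()":
--             tokens.append(ch)
--             pos += 1
--         elif ch == ".":
--             j = pos + 1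
--             while j < n and s[j] != ".":
--                 j += 1
--             if j == n:
--                 return None
--             word = s[pos:j + 1]
--             if word not in _LOGICAL_TOKENS:
--                 return None
--             tokens.append(word)
--             pos = j + 1
--         else:
--             return None
--     return tokens
-- ===== Notes on version B (the rewrite author's own statement) =====
-- stated objective: alternative
-- what changed: Instead of probing all seven literal tokens as prefixes at every position, B scans once to the closing dot of the current word and does a single membership test against the token table.
import Mathlib
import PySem

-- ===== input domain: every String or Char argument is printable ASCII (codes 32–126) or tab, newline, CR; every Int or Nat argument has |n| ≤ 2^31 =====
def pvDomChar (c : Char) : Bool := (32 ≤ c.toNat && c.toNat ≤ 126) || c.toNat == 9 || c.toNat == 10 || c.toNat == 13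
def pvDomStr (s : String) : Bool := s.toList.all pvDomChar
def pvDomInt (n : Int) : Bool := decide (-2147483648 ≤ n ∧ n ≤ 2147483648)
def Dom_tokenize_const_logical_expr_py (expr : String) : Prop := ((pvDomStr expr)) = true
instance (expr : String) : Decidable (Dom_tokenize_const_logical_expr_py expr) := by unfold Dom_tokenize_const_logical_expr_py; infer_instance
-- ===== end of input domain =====

-- B replaces A's per-position chain of seven startswith probes by a single scan to the
-- closing dot plus one membership test (objective: alternative).


-- ===== PORT A =====
-- A's while-loop over the index i becomes structural recursion on the remaining suffix;
-- `s.startswith(tok, i)` is PySem.Chars.startswith on the suffix, `i += k` is `.drop k`.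
def pvTokLoopA : List Char → List String → Option (List String)
  | [], tokens => some tokens
  | c :: rest, tokens =>
    if PySem.Chars.isspace c then pvTokLoopA rest tokens
    else if c = '(' ∨ c = ')' then pvTokLoopA rest (tokens ++ [String.ofList [c]])
    else if PySem.Chars.startswith (c :: rest) ".true.".toList then
      pvTokLoopA ((c :: rest).drop 6) (tokens ++ [".true."])
    else if PySem.Chars.startswith (c :: rest) ".false.".toList then
      pvTokLoopA ((c :: rest).drop 7) (tokens ++ [".false."])
    else if PySem.Chars.startswith (c :: rest) ".not.".toList then
      pvTokLoopA ((c :: rest).drop 5) (tokens ++ [".not."])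
    else if PySem.Chars.startswith (c :: rest) ".and.".toList then
      pvTokLoopA ((c :: rest).drop 5) (tokens ++ [".and."])
    else if PySem.Chars.startswith (c :: rest) ".or.".toList then
      pvTokLoopA ((c :: rest).drop 4) (tokens ++ [".or."])
    else if PySem.Chars.startswith (c :: rest) ".eqv.".toList then
      pvTokLoopA ((c :: rest).drop 5) (tokens ++ [".eqv."])
    else if PySem.Chars.startswith (c :: rest) ".neqv.".toList then
      pvTokLoopA ((c :: rest).drop 6) (tokens ++ [".neqv."])
    else none
  termination_by cs _ => cs.length
  decreasing_by all_goals simp [List.length_drop]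

def tokenize_const_logical_expr_py (expr : String) : Option (List String) :=
  pvTokLoopA (PySem.Str.lower (PySem.Str.strip expr)).toList []

-- ===== PORT B =====
def pvLogicalTokens : List String :=
  [".true.", ".false.", ".not.", ".and.", ".or.", ".eqv.", ".neqv."]

-- Source B's inner `while j < n and s[j] != '.'` scan, relative to the suffix after the opening dot.
def pvFindDot : List Char → Option Nat
  | [] => none
  | c :: rest => if c = '.' then some 0 else (pvFindDot rest).map (· + 1)

def pvTokLoopB : List Char → List String → Option (List String)
  | [], tokens => some tokens
  | c :: rest, tokens =>
    if PySem.Chars.isspace c then pvTokLoopB rest tokens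
    else if c = '(' ∨ c = ')' then pvTokLoopB rest (tokens ++ [String.ofList [c]])
    else if c = '.' then
      match pvFindDot rest with
      | none => none
      | some j =>
        let word := String.ofList ((c :: rest).take (j + 2))
        if word ∈ pvLogicalTokens then pvTokLoopB ((c :: rest).drop (j + 2)) (tokens ++ [word])
        else none
    else none
  termination_by cs _ => cs.length
  decreasing_by all_goals simp [List.length_drop]

def tokenize_const_logical_expr_py_alt (expr : String) : Option (List String) :=
  pvTokLoopB (PySem.Str.lower (PySem.Str.strip expr)).toList []

-- ===== PRECONDITION & SPEC =====
def Spec_tokenize_const_logical_expr_py (expr : String) (out : Option (List String)) : Prop := out = tokenize_const_logical_expr_py_alt expr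
instance (expr : String) (out : Option (List String)) : Decidable (Spec_tokenize_const_logical_expr_py expr out) := by unfold Spec_tokenize_const_logical_expr_py; infer_instance

-- ===== CLAIM (what is proved, stated in full; the proofs are below) =====
def Claim_equal_tokenize_const_logical_expr_py : Prop := ∀ (expr : String), Dom_tokenize_const_logical_expr_py expr → Spec_tokenize_const_logical_expr_py expr (tokenize_const_logical_expr_py expr)

-- ===== LEMMAS AND PROOFS =====

-- a token starting with '.' is never a prefix of a suffix whose head is not '.'
lemma pvStartswithDotFalse (c : Char) (rest t : List Char) (hd : t.head? = some '.')
    (hc : c ≠ '.') : PySem.Chars.startswith (c :: rest) t = false := by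
  cases h : PySem.Chars.startswith (c :: rest) t
  · rfl
  · exfalso
    obtain ⟨u, hu⟩ := (PySem.Chars.startswith_iff _ _).mp h
    cases t with
    | nil => simp at hd
    | cons a ts =>
      simp at hd
      subst hd
      injection hu with h1 _
      exact hc h1.symm

-- if none of the seven literals is a prefix of '.'::rest then no take of it is in the table
lemma pvNotMem (rest : List Char) (k : Nat)
    (h1 : PySem.Chars.startswith ('.' :: rest) ['.','t','r','u','e','.'] = false)
    (h2 : PySem.Chars.startswith ('.' :: rest) ['.','f','a','l','s','e','.'] = false)
    (h3 : PySem.Chars.startswith ('.' :: rest) ['.','n','o','t','.'] = false)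
    (h4 : PySem.Chars.startswith ('.' :: rest) ['.','a','n','d','.'] = false)
    (h5 : PySem.Chars.startswith ('.' :: rest) ['.','o','r','.'] = false)
    (h6 : PySem.Chars.startswith ('.' :: rest) ['.','e','q','v','.'] = false)
    (h7 : PySem.Chars.startswith ('.' :: rest) ['.','n','e','q','v','.'] = false) :
    String.ofList (('.' :: rest).take k) ∉ pvLogicalTokens := by
  intro hm
  simp only [pvLogicalTokens, List.mem_cons, List.not_mem_nil, or_false] at hm
  rcases hm with h | h | h | h | h | h | h <;>
  · have htl := congrArg String.toList h
    simp at htl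
    exact absurd ((PySem.Chars.startswith_iff _ _).mpr (htl ▸ List.take_prefix k ('.' :: rest)))
      (by simp [h1, h2, h3, h4, h5, h6, h7])

lemma pvLoop_eq : ∀ (n : Nat) (cs : List Char) (acc : List String),
    cs.length ≤ n → pvTokLoopA cs acc = pvTokLoopB cs acc := by
  intro n
  induction n with
  | zero =>
    intro cs acc h
    have : cs = [] := List.eq_nil_of_length_eq_zero (Nat.le_zero.mp h)
    subst this
    simp [pvTokLoopA, pvTokLoopB]
  | succ n ih =>
    intro cs acc hlen
    match cs with
    | [] => simp [pvTokLoopA, pvTokLoopB]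
    | c :: rest =>
      have hrest : rest.length ≤ n := by simp at hlen; omega
      by_cases hsp : PySem.Chars.isspace c = true
      · simp only [pvTokLoopA, pvTokLoopB, hsp, if_true]
        exact ih rest acc hrest
      · by_cases hpar : c = '(' ∨ c = ')'
        · simp only [pvTokLoopA, pvTokLoopB, hsp, hpar, if_true, if_false, Bool.false_eq_true]
          exact ih rest _ hrest
        · by_cases hdot : c = '.'
          · subst hdot
            by_cases t1 : PySem.Chars.startswith ('.' :: rest) ['.','t','r','u','e','.'] = true
            · obtain ⟨r, hr⟩ := (PySem.Chars.startswith_iff _ _).mp t1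
              injection hr with _ h2
              subst h2
              simp [pvTokLoopA, pvTokLoopB, pvFindDot, pvLogicalTokens,
                PySem.Chars.isspace, PySem.Chars.startswith, List.isPrefixOf]
              exact ih r _ (by simp at hlen ⊢; omega)
            · by_cases t2 : PySem.Chars.startswith ('.' :: rest) ['.','f','a','l','s','e','.'] = true
              · obtain ⟨r, hr⟩ := (PySem.Chars.startswith_iff _ _).mp t2
                injection hr with _ h2
                subst h2
                simp [pvTokLoopA, pvTokLoopB, pvFindDot, pvLogicalTokens,
                  PySem.Chars.isspace, PySem.Chars.startswith, List.isPrefixOf]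
                exact ih r _ (by simp at hlen ⊢; omega)
              · by_cases t3 : PySem.Chars.startswith ('.' :: rest) ['.','n','o','t','.'] = true
                · obtain ⟨r, hr⟩ := (PySem.Chars.startswith_iff _ _).mp t3
                  injection hr with _ h2
                  subst h2
                  simp [pvTokLoopA, pvTokLoopB, pvFindDot, pvLogicalTokens,
                    PySem.Chars.isspace, PySem.Chars.startswith, List.isPrefixOf]
                  exact ih r _ (by simp at hlen ⊢; omega)
                · by_cases t4 : PySem.Chars.startswith ('.' :: rest) ['.','a','n','d','.'] = true
                  · obtain ⟨r, hr⟩ := (PySem.Chars.startswith_iff _ _).mp t4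
                    injection hr with _ h2
                    subst h2
                    simp [pvTokLoopA, pvTokLoopB, pvFindDot, pvLogicalTokens,
                      PySem.Chars.isspace, PySem.Chars.startswith, List.isPrefixOf]
                    exact ih r _ (by simp at hlen ⊢; omega)
                  · by_cases t5 : PySem.Chars.startswith ('.' :: rest) ['.','o','r','.'] = true
                    · obtain ⟨r, hr⟩ := (PySem.Chars.startswith_iff _ _).mp t5
                      injection hr with _ h2
                      subst h2
                      simp [pvTokLoopA, pvTokLoopB, pvFindDot, pvLogicalTokens,
                        PySem.Chars.isspace, PySem.Chars.startswith, List.isPrefixOf]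
                      exact ih r _ (by simp at hlen ⊢; omega)
                    · by_cases t6 : PySem.Chars.startswith ('.' :: rest) ['.','e','q','v','.'] = true
                      · obtain ⟨r, hr⟩ := (PySem.Chars.startswith_iff _ _).mp t6
                        injection hr with _ h2
                        subst h2
                        simp [pvTokLoopA, pvTokLoopB, pvFindDot, pvLogicalTokens,
                          PySem.Chars.isspace, PySem.Chars.startswith, List.isPrefixOf]
                        exact ih r _ (by simp at hlen ⊢; omega)
                      · by_cases t7 : PySem.Chars.startswith ('.' :: rest) ['.','n','e','q','v','.'] = true
                        · obtain ⟨r, hr⟩ := (PySem.Chars.startswith_iff _ _).mp t7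
                          injection hr with _ h2
                          subst h2
                          simp [pvTokLoopA, pvTokLoopB, pvFindDot, pvLogicalTokens,
                            PySem.Chars.isspace, PySem.Chars.startswith, List.isPrefixOf]
                          exact ih r _ (by simp at hlen ⊢; omega)
                        · -- no literal matches: A returns none; B's word is not in the table
                          have f1 := Bool.eq_false_iff.mpr t1
                          have f2 := Bool.eq_false_iff.mpr t2
                          have f3 := Bool.eq_false_iff.mpr t3
                          have f4 := Bool.eq_false_iff.mpr t4
                          have f5 := Bool.eq_false_iff.mpr t5
                          have f6 := Bool.eq_false_iff.mpr t6
                          have f7 := Bool.eq_false_iff.mpr t7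
                          cases hfd : pvFindDot rest with
                          | none =>
                            simp [pvTokLoopA, pvTokLoopB, f1, f2, f3, f4, f5, f6, f7, hfd,
                              PySem.Chars.isspace]
                          | some j =>
                            have hnm := pvNotMem rest (j + 2) f1 f2 f3 f4 f5 f6 f7
                            have hnm' : String.ofList ('.' :: List.take (j + 1) rest) ∉ pvLogicalTokens := by
                              simpa using hnm
                            simp [pvTokLoopA, pvTokLoopB, f1, f2, f3, f4, f5, f6, f7, hfd,
                              PySem.Chars.isspace, hnm']
          · -- head is neither whitespace, paren nor '.': both return none
            have f1 := pvStartswithDotFalse c rest ['.','t','r','u','e','.'] rfl hdot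
            have f2 := pvStartswithDotFalse c rest ['.','f','a','l','s','e','.'] rfl hdot
            have f3 := pvStartswithDotFalse c rest ['.','n','o','t','.'] rfl hdot
            have f4 := pvStartswithDotFalse c rest ['.','a','n','d','.'] rfl hdot
            have f5 := pvStartswithDotFalse c rest ['.','o','r','.'] rfl hdot
            have f6 := pvStartswithDotFalse c rest ['.','e','q','v','.'] rfl hdot
            have f7 := pvStartswithDotFalse c rest ['.','n','e','q','v','.'] rfl hdot
            simp [pvTokLoopA, pvTokLoopB, hsp, hpar, hdot, f1, f2, f3, f4, f5, f6, f7]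

-- ===== VERDICT (by name: the statement is the Claim_ definition above) =====
theorem tokenize_const_logical_expr_py_spec : Claim_equal_tokenize_const_logical_expr_py := by
  intro expr _
  unfold Spec_tokenize_const_logical_expr_py tokenize_const_logical_expr_py tokenize_const_logical_expr_py_alt
  exact pvLoop_eq _ _ _ le_rfl
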